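-- pv_equiv track=rewrite | github.com/helmuthb/datascience-thesis | lib/preprocess.py | class_indices
-- ===== SOURCE A (Python) =====
-- from typing import Callable, Tuple, List
--
-- def class_indices(classes: List[str], subset: List[List]) -> List[int]:
--     """Get the indices of the classes in the subset.
--     """
--     indices = []
--     for c in classes:
--         # default index for each class - 0 = background
--         idx = 0
--         for i, s in enumerate(subset):
--             if c in s:
--                 idx = i
--                 # do not search in further subsets
--                 break
--         # Append index to list of indices
--         indices.append(idx)
--     return indices
-- ===== SOURCE B (Python) =====
-- def class_indices(classes, subset):
--     """Get the indices of the classes in the subset."""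
--     first = {}
--     for i, s in enumerate(subset):
--         for e in s:
--             if e not in first:
--                 first[e] = i
--     return [first.get(c, 0) for c in classes]
-- ===== Notes on version B (the rewrite author's own statement) =====
-- stated objective: faster
-- what changed: Replaced the per-class scan over all subsets by a single pass that builds an element-to-first-subset-index dict, then answers each class with one O(1) lookup.
import Mathlib
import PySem

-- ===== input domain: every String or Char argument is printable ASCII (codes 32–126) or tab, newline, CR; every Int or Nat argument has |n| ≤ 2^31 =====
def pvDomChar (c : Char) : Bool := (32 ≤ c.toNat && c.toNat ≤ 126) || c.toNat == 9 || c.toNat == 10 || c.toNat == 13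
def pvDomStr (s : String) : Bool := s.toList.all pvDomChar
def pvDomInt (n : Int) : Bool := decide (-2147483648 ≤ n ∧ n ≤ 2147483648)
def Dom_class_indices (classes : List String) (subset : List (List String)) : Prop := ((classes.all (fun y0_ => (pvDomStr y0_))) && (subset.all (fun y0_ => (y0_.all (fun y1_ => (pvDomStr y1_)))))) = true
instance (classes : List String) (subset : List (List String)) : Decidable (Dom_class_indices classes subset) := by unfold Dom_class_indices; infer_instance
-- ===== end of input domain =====

-- B replaces A's per-class scan over all subsets by one pass building an
-- element→first-subset-index dict, then one lookup per class (asymptotically faster).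

-- ===== PORT A =====
-- inner loop of A: 'idx = 0; for i, s in enumerate(subset): if c in s: idx = i; break'
def pvAFind (c : String) : List (Int × List String) → Int
  | [] => 0
  | (i, s) :: rest => if c ∈ s then i else pvAFind c rest

def class_indices (classes : List String) (subset : List (List String)) : List Int :=
  classes.foldl (fun indices c => indices ++ [pvAFind c (PySem.List.enumerate subset 0)]) []

-- ===== PORT B =====
-- 'for i, s in enumerate(subset): for e in s: if e not in first: first[e] = i'
def pvBuildFirst (subset : List (List String)) : PySem.Dict String Int :=
  (PySem.List.enumerate subset 0).foldl
    (fun d p => p.2.foldl (fun d e => if d.contains e then d else d.insert e p.1) d)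
    PySem.Dict.empty

def class_indices_alt (classes : List String) (subset : List (List String)) : List Int :=
  classes.map (fun c => (pvBuildFirst subset).getD c 0)

-- ===== PRECONDITION & SPEC =====
def Spec_class_indices (classes : List String) (subset : List (List String)) (out : List Int) : Prop := out = class_indices_alt classes subset
instance (classes : List String) (subset : List (List String)) (out : List Int) : Decidable (Spec_class_indices classes subset out) := by unfold Spec_class_indices; infer_instance

-- ===== CLAIM (what is proved, stated in full; the proofs are below) =====
def Claim_equal_class_indices : Prop := ∀ (classes : List String) (subset : List (List String)), Dom_class_indices classes subset → Spec_class_indices classes subset (class_indices classes subset)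

-- ===== LEMMAS AND PROOFS =====

-- option-valued version of A's inner search (none = no subset contains c)
def pvAFind? (c : String) : List (Int × List String) → Option Int
  | [] => none
  | (i, s) :: rest => if c ∈ s then some i else pvAFind? c rest

theorem pvAFind_eq (c : String) (L : List (Int × List String)) :
    pvAFind c L = (pvAFind? c L).getD 0 := by
  induction L with
  | nil => rfl
  | cons p rest ih =>
    obtain ⟨i, s⟩ := p
    simp only [pvAFind, pvAFind?]
    split_ifs <;> simp [ih]

theorem pvInner_get? (s : List String) (i : Int) (d : PySem.Dict String Int) (c : String) :
    (s.foldl (fun d e => if d.contains e then d else d.insert e i) d).get? c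
      = (d.get? c).or (if c ∈ s then some i else none) := by
  induction s generalizing d with
  | nil => simp
  | cons e s' ih =>
    simp only [List.foldl_cons]
    rw [ih]
    by_cases hc : d.contains e = true
    · simp only [hc, if_true]
      by_cases hce : c = e
      · subst hce
        have : ∃ v, d.get? c = some v := by
          rcases h : d.get? c with _ | v
          · rw [PySem.Dict.get?_eq_none_iff_contains] at h
            exact absurd hc (by simp [h])
          · exact ⟨v, rfl⟩
        obtain ⟨v, hv⟩ := this
        simp [hv]
      · simp [List.mem_cons, hce]
    · rw [if_neg hc]
      by_cases hce : c = e
      · subst hce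
        have hnone : d.get? c = none := by
          rw [PySem.Dict.get?_eq_none_iff_contains]; simpa using hc
        simp [PySem.Dict.get?_insert_self, hnone]
      · rw [PySem.Dict.get?_insert_of_ne _ _ hce]
        simp [List.mem_cons, hce]

theorem pvBuild_get? (L : List (Int × List String)) (d : PySem.Dict String Int) (c : String) :
    (L.foldl (fun d p => p.2.foldl (fun d e => if d.contains e then d else d.insert e p.1) d) d).get? c
      = (d.get? c).or (pvAFind? c L) := by
  induction L generalizing d with
  | nil => simp [pvAFind?]
  | cons p rest ih =>
    obtain ⟨i, s⟩ := p
    simp only [List.foldl_cons]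
    rw [ih, pvInner_get?]
    simp only [pvAFind?]
    split_ifs with h
    · rcases d.get? c <;> simp
    · rcases d.get? c <;> simp

theorem pvLookup_eq (subset : List (List String)) (c : String) :
    (pvBuildFirst subset).getD c 0 = pvAFind c (PySem.List.enumerate subset 0) := by
  rw [pvAFind_eq, PySem.Dict.getD_eq_get?_getD]
  rw [pvBuildFirst, pvBuild_get? (PySem.List.enumerate subset 0) PySem.Dict.empty c]
  simp

-- ===== VERDICT (by name: the statement is the Claim_ definition above) =====
theorem class_indices_spec : Claim_equal_class_indices := by
  intro classes subset _
  show class_indices classes subset = class_indices_alt classes subset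
  rw [class_indices, class_indices_alt,
      PySem.List.foldl_append_singleton_eq_map]
  exact List.map_congr_left fun c _ => (pvLookup_eq subset c).symm
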